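-- pv_equiv track=rewrite | github.com/AvrilMZ/Teoria_de_Algoritmos | Actividades/7 - Reducciones/ej20.py | verificador_ps
-- ===== SOURCE A (Python) =====
-- def verificador_ps(pedidos, k, seleccion):
-- 	if len(seleccion) < k:
-- 		return False
--
-- 	for c in seleccion:
-- 		if c not in pedidos:
-- 			return False
--
-- 	for i in range(len(seleccion)):
-- 		c_1 = seleccion[i]
-- 		for j in range(i + 1, len(seleccion)):
-- 			c_2 = seleccion[j]
-- 			if any(v in c_2 for v in c_1):
-- 				return False
--
-- 	return True
-- ===== SOURCE B (Python) =====
-- def verificador_ps(pedidos, k, seleccion):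
-- 	if len(seleccion) < k:
-- 		return False
-- 	pedidos_set = {tuple(p) for p in pedidos}
-- 	seen = set()
-- 	for c in seleccion:
-- 		if tuple(c) not in pedidos_set:
-- 			return False
-- 		if any(v in seen for v in c):
-- 			return False
-- 		seen.update(c)
-- 	return True
-- ===== Notes on version B (the rewrite author's own statement) =====
-- stated objective: alternative
-- what changed: Replaced the quadratic pairwise-disjointness double loop by a single pass that accumulates already-seen elements in a set, and the per-item list membership scan over pedidos by one prebuilt set of tuples.
import Mathlib
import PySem

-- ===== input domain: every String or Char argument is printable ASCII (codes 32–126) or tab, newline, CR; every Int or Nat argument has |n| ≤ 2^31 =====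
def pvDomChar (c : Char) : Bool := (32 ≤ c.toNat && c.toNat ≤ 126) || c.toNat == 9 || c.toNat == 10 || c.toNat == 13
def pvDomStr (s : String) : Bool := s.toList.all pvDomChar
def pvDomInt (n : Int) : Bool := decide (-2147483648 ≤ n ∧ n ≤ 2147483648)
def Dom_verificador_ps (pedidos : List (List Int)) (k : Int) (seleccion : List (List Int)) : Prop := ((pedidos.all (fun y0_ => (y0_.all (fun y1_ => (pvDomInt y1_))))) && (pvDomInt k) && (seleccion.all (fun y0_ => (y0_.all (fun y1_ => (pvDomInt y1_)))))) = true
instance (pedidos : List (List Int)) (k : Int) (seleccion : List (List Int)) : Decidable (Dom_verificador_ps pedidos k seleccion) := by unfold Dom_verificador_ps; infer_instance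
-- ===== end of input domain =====

-- B replaces A's pairwise-disjointness double loop by one pass with an accumulated seen-set
-- and the per-item pedidos membership scans by one prebuilt set (objective: alternative).

-- ===== PORT A =====
-- the double index loop 'for i … for j in range(i+1, …)' checks each element against all later ones,
-- ported as the obvious structural recursion over the same pairs in the same order
def aPairs : List (List Int) → Bool
  | [] => true
  | c1 :: rest => (rest.all fun c2 => !(c1.any fun v => c2.contains v)) && aPairs rest

def verificador_ps (pedidos : List (List Int)) (k : Int) (seleccion : List (List Int)) : Bool :=
  if (seleccion.length : Int) < k then false
  else if !(seleccion.all fun c => pedidos.contains c) then false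
  else aPairs seleccion

-- ===== PORT B =====
def bLoop (pedidosSet : PySem.Set (List Int)) (seen : PySem.Set Int) : List (List Int) → Bool
  | [] => true
  | c :: rest =>
    if !(PySem.Set.contains pedidosSet c) then false
    else if c.any (fun v => PySem.Set.contains seen v) then false
    else bLoop pedidosSet (PySem.Set.update seen c) rest

def verificador_ps_alt (pedidos : List (List Int)) (k : Int) (seleccion : List (List Int)) : Bool :=
  if (seleccion.length : Int) < k then false
  else bLoop (PySem.Set.ofList pedidos) PySem.Set.empty seleccion

-- ===== PRECONDITION & SPEC =====
def Spec_verificador_ps (pedidos : List (List Int)) (k : Int) (seleccion : List (List Int)) (out : Bool) : Prop := out = verificador_ps_alt pedidos k seleccion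
instance (pedidos : List (List Int)) (k : Int) (seleccion : List (List Int)) (out : Bool) : Decidable (Spec_verificador_ps pedidos k seleccion out) := by unfold Spec_verificador_ps; infer_instance

-- ===== CLAIM (what is proved, stated in full; the proofs are below) =====
def Claim_equal_verificador_ps : Prop := ∀ (pedidos : List (List Int)) (k : Int) (seleccion : List (List Int)), Dom_verificador_ps pedidos k seleccion → Spec_verificador_ps pedidos k seleccion (verificador_ps pedidos k seleccion)

-- ===== LEMMAS AND PROOFS =====

-- B's fused loop = (every item is in pedidosSet) ∧ (no item meets 'seen') ∧ A's pairwise check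
theorem bLoop_eq (sel : List (List Int)) : ∀ (seen : PySem.Set Int) (pset : PySem.Set (List Int)),
    bLoop pset seen sel =
      ((sel.all fun c => PySem.Set.contains pset c) &&
       (sel.all fun c => !(c.any (fun v => PySem.Set.contains seen v))) &&
       aPairs sel) := by
  induction sel with
  | nil => intro seen pset; rfl
  | cons c rest ih =>
    intro seen pset
    by_cases hc : c ∈ pset
    · by_cases hs : ∃ v ∈ c, v ∈ seen
      · simp [bLoop, aPairs, hc, hs, List.any_eq_true]
      · simp only [bLoop, aPairs, ih, List.all_cons]
        rw [Bool.eq_iff_iff]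
        simp [List.all_eq_true, List.any_eq_true, hc, hs, PySem.Set.mem_update]
        constructor
        · rintro ⟨⟨hp, hu⟩, hP⟩
          exact ⟨⟨hp, fun v hv hvs => hs ⟨v, hv, hvs⟩, fun x hx v hv => (hu x hx v hv).1⟩,
                 fun x hx v hvc hvx => (hu x hx v hvx).2 hvc, hP⟩
        · rintro ⟨⟨hp, _, hrs⟩, hpair, hP⟩
          exact ⟨⟨hp, fun x hx v hv => ⟨hrs x hx v hv, fun hvc => hpair x hx v hvc hv⟩⟩, hP⟩
    · simp [bLoop, aPairs, hc]

theorem alt_mem (pedidos seleccion : List (List Int)) :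
    (seleccion.all fun c => PySem.Set.contains (PySem.Set.ofList pedidos) c) =
    (seleccion.all fun c => pedidos.contains c) := by
  induction seleccion with
  | nil => rfl
  | cons c rest ih =>
    simp only [List.all_cons, ih]
    congr 1
    rw [Bool.eq_iff_iff]
    simp [PySem.Set.mem_ofList]

-- ===== VERDICT (by name: the statement is the Claim_ definition above) =====
theorem verificador_ps_spec : Claim_equal_verificador_ps := by
  intro pedidos k seleccion _
  unfold Spec_verificador_ps verificador_ps verificador_ps_alt
  rw [bLoop_eq, alt_mem]
  have hempty : (seleccion.all fun c => !(c.any (fun v => PySem.Set.contains PySem.Set.empty v))) = true := by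
    simp [PySem.Set.empty, PySem.Set.contains]
  rw [hempty]
  split_ifs with hk hmem
  · rfl
  · have h : (seleccion.all fun c => pedidos.contains c) = false := by simpa using hmem
    rw [h]; rfl
  · have h : (seleccion.all fun c => pedidos.contains c) = true := by simpa using hmem
    rw [h]; rfl
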